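-- pv_equiv track=rewrite | github.com/baday19/project-specific_code_completion | utils.py | split_to_blocks
-- ===== SOURCE A (Python) =====
-- def split_to_blocks(code):
--     lines = code.splitlines()
--
--     res = []
--     temp = []
--     for line_no, line in enumerate(lines):
--         if line != '':
--             temp.append((line, line_no))
--             continue
--         if len(temp) != 0:
--             res.append(temp)
--         temp = []
--
--     if len(temp) != 0:
--         res.append(temp)
--     return res
-- ===== SOURCE B (Python) =====
-- def split_to_blocks(code):
--     # Build maximal runs of equal emptiness (a groupby), then keep the non-empty runs.
--     runs = []
--     for no, line in enumerate(code.splitlines()):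
--         k = (line == '')
--         if runs and runs[-1][0] == k:
--             runs[-1][1].append((line, no))
--         else:
--             runs.append((k, [(line, no)]))
--     return [g for k, g in runs if not k]
-- ===== Notes on version B (the rewrite author's own statement) =====
-- stated objective: idiomatic
-- what changed: Replaces the temp accumulator with manual flush/trailing-flush by a groupby-style pass that materialises all maximal runs of equal emptiness and then filters the non-empty runs.
import Mathlib
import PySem

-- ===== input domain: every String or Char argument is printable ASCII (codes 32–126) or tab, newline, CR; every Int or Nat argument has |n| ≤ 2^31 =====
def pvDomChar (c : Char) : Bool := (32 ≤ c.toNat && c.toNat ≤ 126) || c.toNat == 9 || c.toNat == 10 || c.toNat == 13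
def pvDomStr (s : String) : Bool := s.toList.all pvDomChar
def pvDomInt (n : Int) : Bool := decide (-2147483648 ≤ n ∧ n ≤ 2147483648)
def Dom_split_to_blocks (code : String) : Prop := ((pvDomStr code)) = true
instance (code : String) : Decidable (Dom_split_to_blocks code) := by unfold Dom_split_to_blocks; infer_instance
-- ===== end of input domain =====

-- B replaces A's temp-accumulator-with-final-flush by a groupby-style pass: build all
-- maximal runs of equal emptiness, then keep the non-empty runs (idiomatic, same cost).


-- ===== PORT A =====
-- one loop iteration of A: state (res, temp)
def aStep (st : List (List (String × Int)) × List (String × Int)) (p : Int × String) :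
    List (List (String × Int)) × List (String × Int) :=
  if p.2 ≠ "" then (st.1, st.2 ++ [(p.2, p.1)])
  else if st.2.length ≠ 0 then (st.1 ++ [st.2], [])
  else (st.1, [])

def split_to_blocks (code : String) : List (List (String × Int)) :=
  let lines := PySem.Str.splitlines code
  let st := (PySem.List.enumerate lines).foldl aStep ([], [])
  if st.2.length ≠ 0 then st.1 ++ [st.2] else st.1

-- ===== PORT B =====
-- one loop iteration of B: extend the last run if its key matches, else start a new run
def bStep (runs : List (Bool × List (String × Int))) (p : Int × String) :
    List (Bool × List (String × Int)) :=
  let k := p.2 == ""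
  match runs.getLast? with
  | some (k', g) =>
      if k' == k then runs.dropLast ++ [(k', g ++ [(p.2, p.1)])]
      else runs ++ [(k, [(p.2, p.1)])]
  | none => runs ++ [(k, [(p.2, p.1)])]

def split_to_blocks_alt (code : String) : List (List (String × Int)) :=
  ((PySem.List.enumerate (PySem.Str.splitlines code)).foldl bStep []).filterMap
    (fun r => if r.1 then none else some r.2)

-- ===== PRECONDITION & SPEC =====
def Spec_split_to_blocks (code : String) (out : List (List (String × Int))) : Prop := out = split_to_blocks_alt code
instance (code : String) (out : List (List (String × Int))) : Decidable (Spec_split_to_blocks code out) := by unfold Spec_split_to_blocks; infer_instance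

-- ===== CLAIM (what is proved, stated in full; the proofs are below) =====
def Claim_equal_split_to_blocks : Prop := ∀ (code : String), Dom_split_to_blocks code → Spec_split_to_blocks code (split_to_blocks code)

-- ===== LEMMAS AND PROOFS =====

-- the non-empty-run selection B performs at the end
def selRuns (runs : List (Bool × List (String × Int))) : List (List (String × Int)) :=
  runs.filterMap (fun r => if r.1 then none else some r.2)

theorem selRuns_append (l r : List (Bool × List (String × Int))) :
    selRuns (l ++ r) = selRuns l ++ selRuns r := by
  simp [selRuns]

theorem selRuns_true (g : List (String × Int)) : selRuns [(true, g)] = [] := rfl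

theorem selRuns_false (g : List (String × Int)) : selRuns [(false, g)] = [g] := rfl

-- main loop invariant: A's state (res, temp) corresponds to B's runs
theorem loop_agree : ∀ (ps : List (Int × String))
    (res : List (List (String × Int))) (temp : List (String × Int))
    (runs : List (Bool × List (String × Int))),
    (temp = [] → selRuns runs = res ∧ (runs = [] ∨ ∃ rs g, runs = rs ++ [(true, g)])) →
    (temp ≠ [] → ∃ rs, runs = rs ++ [(false, temp)] ∧ selRuns rs = res) →
    (if (ps.foldl aStep (res, temp)).2.length ≠ 0
       then (ps.foldl aStep (res, temp)).1 ++ [(ps.foldl aStep (res, temp)).2]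
       else (ps.foldl aStep (res, temp)).1)
      = selRuns (ps.foldl bStep runs) := by
  intro ps
  induction ps with
  | nil =>
    intro res temp runs h0 h1
    by_cases ht : temp = []
    · obtain ⟨h, _⟩ := h0 ht
      simp [List.foldl, ht, h]
    · obtain ⟨rs, hrs, hsel⟩ := h1 ht
      simp only [List.foldl_nil, hrs]
      rw [if_pos (by simpa [List.length_eq_zero_iff] using ht), selRuns_append, selRuns_false, hsel]
  | cons p ps ih =>
    intro res temp runs h0 h1
    rw [List.foldl_cons, List.foldl_cons]
    by_cases hp : p.2 = ""
    · -- empty line: A flushes temp, B's key is true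
      by_cases ht : temp = []
      · subst ht
        obtain ⟨hsel, hshape⟩ := h0 rfl
        have ha : aStep (res, []) p = (res, []) := by simp [aStep, hp]
        rcases hshape with h | ⟨rs, g, hrs⟩
        · -- runs empty: new (true, _) run
          have hb : bStep runs p = runs ++ [(true, [(p.2, p.1)])] := by
            simp [bStep, hp, h]
          rw [ha, hb]
          apply ih
          · intro _
            exact ⟨by rw [selRuns_append, selRuns_true, List.append_nil, hsel],
                   Or.inr ⟨runs, [(p.2, p.1)], rfl⟩⟩
          · intro hc; exact absurd rfl hc
        · -- last run is true: merge
          have hb : bStep runs p = rs ++ [(true, g ++ [(p.2, p.1)])] := by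
            simp [bStep, hp, hrs]
          rw [ha, hb]
          apply ih
          · intro _
            refine ⟨?_, Or.inr ⟨rs, g ++ [(p.2, p.1)], rfl⟩⟩
            have : selRuns runs = selRuns rs := by
              rw [hrs, selRuns_append, selRuns_true, List.append_nil]
            rw [selRuns_append, selRuns_true, List.append_nil, ← this, hsel]
          · intro hc; exact absurd rfl hc
      · -- temp nonempty: A appends temp to res; B starts a new true run
        obtain ⟨rs, hrs, hsel⟩ := h1 ht
        have ha : aStep (res, temp) p = (res ++ [temp], []) := by
          simp [aStep, hp, List.length_eq_zero_iff, ht]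
        have hb : bStep runs p = runs ++ [(true, [(p.2, p.1)])] := by
          simp [bStep, hp, hrs]
        rw [ha, hb]
        apply ih
        · intro _
          refine ⟨?_, Or.inr ⟨runs, [(p.2, p.1)], rfl⟩⟩
          rw [selRuns_append, selRuns_true, List.append_nil, hrs, selRuns_append,
            selRuns_false, hsel]
        · intro hc; exact absurd rfl hc
    · -- non-empty line: A extends temp, B's key is false
      have ha : aStep (res, temp) p = (res, temp ++ [(p.2, p.1)]) := by
        simp [aStep, hp]
      by_cases ht : temp = []
      · subst ht
        obtain ⟨hsel, hshape⟩ := h0 rfl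
        have hb : bStep runs p = runs ++ [(false, [(p.2, p.1)])] := by
          rcases hshape with h | ⟨rs, g, hrs⟩
          · simp [bStep, hp, h]
          · simp [bStep, hp, hrs]
        rw [ha, hb]
        apply ih
        · intro hc; simp at hc
        · intro _
          exact ⟨runs, by simp, hsel⟩
      · obtain ⟨rs, hrs, hsel⟩ := h1 ht
        have hb : bStep runs p = rs ++ [(false, temp ++ [(p.2, p.1)])] := by
          simp [bStep, hp, hrs]
        rw [ha, hb]
        apply ih
        · intro hc; simp at hc
        · intro _
          exact ⟨rs, rfl, hsel⟩

-- ===== VERDICT (by name: the statement is the Claim_ definition above) =====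
theorem split_to_blocks_spec : Claim_equal_split_to_blocks := by
  intro code _
  unfold Spec_split_to_blocks split_to_blocks split_to_blocks_alt
  exact loop_agree _ [] [] []
    (fun _ => ⟨rfl, Or.inl rfl⟩)
    (fun hc => absurd rfl hc)
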